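-- pv_equiv track=rewrite | github.com/Francisca105/ist-leic-a | FP/Projeto/p1/projeto.py | corta_texto
-- ===== SOURCE A (Python) =====
-- def limpa_texto(t):
--     '''
--     Esta funcao recebe uma cadeia de carateres e devolve a cadeia de carateres limpa (sem caracteres brancos).
--     '''
--     return  " ".join(t.split()) # Separa o texto e junta-o numa nova string removendo caracteres branco e de escape
--
-- def corta_texto(string, int):
--     '''
--     Esta funcao recebe uma cadeia de caracteres e um numero inteiro a que correspondem, respetivamente, a um texto limpo (podendo recorrer a funcao anterior) e a largura da coluna.
--     Ao separar o texto em 2, esta nao corta nenhuma palavra, ou seja, as palavras ficam todas completas e este tera no maximo um comprimento igual a largura fornecida. A segunda cadeira corresponde ao resto.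
--     '''
--     tuplo = string.split() # Separar a cadeia em palavras
--     length = 0 # Variavel auxiliar para o tamanho da primeira cadeia de forma a nao exceder o tamanho suposto
--     res = ["", ""] # Resultado da funcao
--     extra = False # Variavel auxiliar que ira determinar se este ja chegou ao valor maximo da primeira cadeia
--
--     for e in tuplo:
--         lenE = len(e)
--         if (length + lenE) <= int and not extra: # Verifica se nao excede o tamanho e com recurso a variavel extra verifica se pode adicionar
--             length += lenE +1 # Adiciona a length o tamanho da palavra +1 (do espaco entre as palavras)
--             res[0] += f"{e} " # Acrescenta ao primeiro texto a palavra +1 espaco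
--         else:
--             extra = True # Para nao executar o if anterior quando ja passou do tamanho pela primeira vez
--             res[1] += f"{e} " # Adiciona ao segundo texto a palavra + espaco
--     resultado = limpa_texto(res[0]), limpa_texto(res[1]) # Se tiver um espaco a mais no final dos textos este sera limpo
--
--     return tuple(resultado) # Passar a lista a tuplo que e o formato pedido
-- ===== SOURCE B (Python) =====
-- def corta_texto(string, int):
--     words = string.split()
--     k, total = 0, 0
--     while k < len(words) and total + len(words[k]) <= int:
--         total += len(words[k]) + 1
--         k += 1
--     return (' '.join(words[:k]), ' '.join(words[k:]))
-- ===== Notes on version B (the rewrite author's own statement) =====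
-- stated objective: simpler
-- what changed: B first computes the cut index k in one scan over the word lengths and then builds both halves as ' '.join of the two slices, instead of A's flag-driven loop that concatenates 'word ' into one of two accumulators and then re-splits and re-joins both to strip the trailing space.
import Mathlib
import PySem

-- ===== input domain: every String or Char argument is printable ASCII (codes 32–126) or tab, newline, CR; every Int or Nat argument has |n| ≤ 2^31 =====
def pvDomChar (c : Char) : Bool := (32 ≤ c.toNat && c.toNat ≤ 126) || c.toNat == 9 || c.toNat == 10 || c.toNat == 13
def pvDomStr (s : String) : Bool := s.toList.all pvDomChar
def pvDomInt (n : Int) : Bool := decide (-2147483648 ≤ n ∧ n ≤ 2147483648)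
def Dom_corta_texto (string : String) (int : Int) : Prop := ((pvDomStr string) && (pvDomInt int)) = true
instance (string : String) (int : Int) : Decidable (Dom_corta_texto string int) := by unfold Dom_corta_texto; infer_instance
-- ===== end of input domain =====

-- B computes the cut index in one scan and then slices-and-joins, instead of A's
-- flag-driven interleaved concatenation followed by a re-cleaning pass (objective: simpler).

-- ===== PORT A =====
def limpa_texto (t : String) : String :=
  PySem.Str.join " " (PySem.Str.split₀ t)

def pvStepA (int : Int) (st : Int × String × String × Bool) (e : String) :
    Int × String × String × Bool :=
  let lenE := PySem.Str.len e
  if st.1 + lenE ≤ int ∧ st.2.2.2 = false then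
    (st.1 + lenE + 1, st.2.1 ++ e ++ " ", st.2.2.1, st.2.2.2)
  else
    (st.1, st.2.1, st.2.2.1 ++ e ++ " ", true)

def corta_texto (string : String) (int : Int) : String × String :=
  let tuplo := PySem.Str.split₀ string
  let r := tuplo.foldl (pvStepA int) (0, "", "", false)
  (limpa_texto r.2.1, limpa_texto r.2.2.1)

-- ===== PORT B =====
-- the while loop of Source B: count how many leading words fit, threading the running total
def pvFit (int : Int) : List String → Int → Nat
  | [], _ => 0
  | w :: ws, total =>
    if total + PySem.Str.len w ≤ int then pvFit int ws (total + PySem.Str.len w + 1) + 1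
    else 0

def corta_texto_alt (string : String) (int : Int) : String × String :=
  let words := PySem.Str.split₀ string
  let k := pvFit int words 0
  (PySem.Str.join " " (words.take k), PySem.Str.join " " (words.drop k))

-- ===== PRECONDITION & SPEC =====
def Spec_corta_texto (string : String) (int : Int) (out : String × String) : Prop := out = corta_texto_alt string int
instance (string : String) (int : Int) (out : String × String) : Decidable (Spec_corta_texto string int out) := by unfold Spec_corta_texto; infer_instance

-- ===== CLAIM (what is proved, stated in full; the proofs are below) =====
def Claim_equal_corta_texto : Prop := ∀ (string : String) (int : Int), Dom_corta_texto string int → Spec_corta_texto string int (corta_texto string int)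

-- ===== LEMMAS AND PROOFS =====

/-- append each word followed by one space (shape of A's accumulators) -/
def pvSp (r : String) (ws : List String) : String :=
  ws.foldl (fun a w => a ++ w ++ " ") r

/-- a genuine word: nonempty and whitespace-free -/
def pvWordOk (w : List Char) : Prop :=
  w ≠ [] ∧ ∀ c ∈ w, PySem.Chars.isspace c = false

-- once `extra` is true, the loop appends everything to the second accumulator
theorem pvFoldTrue (int : Int) : ∀ (ws : List String) (len : Int) (r0 r1 : String),
    ws.foldl (pvStepA int) (len, r0, r1, true) = (len, r0, pvSp r1 ws, true) := by
  intro ws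
  induction ws with
  | nil => intro len r0 r1; simp [pvSp]
  | cons w ws ih =>
    intro len r0 r1
    simp only [List.foldl_cons, pvStepA]
    simp [ih, pvSp]

theorem pvFoldFalse (int : Int) : ∀ (ws : List String) (total : Int) (r0 r1 : String),
    (ws.foldl (pvStepA int) (total, r0, r1, false)).2.1
       = pvSp r0 (ws.take (pvFit int ws total))
    ∧ (ws.foldl (pvStepA int) (total, r0, r1, false)).2.2.1
       = pvSp r1 (ws.drop (pvFit int ws total)) := by
  intro ws
  induction ws with
  | nil => intro total r0 r1; simp [pvSp, pvFit]
  | cons w ws ih =>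
    intro total r0 r1
    by_cases h : total + (w.length : Int) ≤ int
    · have hih := ih (total + (w.length : Int) + 1) (r0 ++ w ++ " ") r1
      simp only [List.foldl_cons, pvStepA, pvFit, PySem.Str.len_eq] at *
      simp [h, pvSp] at *
      exact hih
    · simp only [List.foldl_cons, pvStepA, pvFit, PySem.Str.len_eq] at *
      simp [h, pvFoldTrue int ws, pvSp]

-- split₀.go consumes a whitespace-free block into `cur`
theorem pvGoWord : ∀ (w rest cur : List Char) (acc : List (List Char)),
    (∀ c ∈ w, PySem.Chars.isspace c = false) →
    PySem.Chars.split₀.go (w ++ rest) cur acc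
      = PySem.Chars.split₀.go rest (w.reverse ++ cur) acc := by
  intro w
  induction w with
  | nil => intro rest cur acc _; simp
  | cons c w ih =>
    intro rest cur acc h
    have hc : PySem.Chars.isspace c = false := h c (by simp)
    rw [List.cons_append, PySem.Chars.split₀.go, hc]
    simp only [Bool.false_eq_true, if_false]
    rw [ih rest (c :: cur) acc (fun d hd => h d (by simp [hd]))]
    simp

theorem pvGoSpace (rest : List Char) (cur : List Char) (acc : List (List Char))
    (h : cur ≠ []) :
    PySem.Chars.split₀.go (' ' :: rest) cur acc
      = PySem.Chars.split₀.go rest [] (cur.reverse :: acc) := by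
  rw [PySem.Chars.split₀.go.eq_def]
  have hsp : PySem.Chars.isspace ' ' = true := by decide
  simp [hsp, h]

theorem pvGoFlat : ∀ (ws : List (List Char)) (acc : List (List Char)),
    (∀ w ∈ ws, pvWordOk w) →
    PySem.Chars.split₀.go ((ws.map (fun w => w ++ [' '])).flatten) [] acc
      = acc.reverse ++ ws := by
  intro ws
  induction ws with
  | nil =>
    intro acc _
    simp only [List.map_nil, List.flatten_nil]
    rw [PySem.Chars.split₀.go]
    simp
  | cons w ws ih =>
    intro acc h
    have hw : pvWordOk w := h w (by simp)
    simp only [List.map_cons, List.flatten_cons, List.append_assoc, List.singleton_append]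
    rw [pvGoWord w (' ' :: (ws.map (fun w => w ++ [' '])).flatten) [] acc hw.2]
    rw [pvGoSpace _ _ _ (by simp [hw.1])]
    simp only [List.append_nil, List.reverse_reverse]
    rw [ih (w :: acc) (fun v hv => h v (by simp [hv]))]
    simp

theorem pvSplitFlat (ws : List (List Char)) (h : ∀ w ∈ ws, pvWordOk w) :
    PySem.Chars.split₀ ((ws.map (fun w => w ++ [' '])).flatten) = ws := by
  rw [PySem.Chars.split₀, pvGoFlat ws [] h]
  simp

-- every piece produced by split₀ is a genuine word
theorem pvGoOk : ∀ (s cur : List Char) (acc : List (List Char)),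
    (∀ c ∈ cur, PySem.Chars.isspace c = false) →
    (∀ w ∈ acc, pvWordOk w) →
    ∀ w ∈ PySem.Chars.split₀.go s cur acc, pvWordOk w := by
  intro s
  induction s with
  | nil =>
    intro cur acc hcur hacc w hw
    rw [PySem.Chars.split₀.go] at hw
    by_cases hc : cur = []
    · simp [hc] at hw
      exact hacc w (by simpa using hw)
    · simp [List.isEmpty_eq_false_iff.mpr hc] at hw
      rcases hw with hw | hw
      · exact hacc w (by simpa using hw)
      · refine hw ▸ ⟨by simpa using hc, fun c hc' => hcur c (by simpa using hc')⟩
  | cons c rest ih =>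
    intro cur acc hcur hacc w hw
    rw [PySem.Chars.split₀.go] at hw
    by_cases hsp : PySem.Chars.isspace c = true
    · simp only [hsp, if_true] at hw
      by_cases hc : cur = []
      · simp [hc] at hw
        exact ih [] acc (by simp) hacc w hw
      · simp only [List.isEmpty_eq_false_iff.mpr hc, Bool.false_eq_true, if_false] at hw
        refine ih [] (cur.reverse :: acc) (by simp) ?_ w hw
        intro v hv
        rcases List.mem_cons.mp hv with hv | hv
        · exact hv ▸ ⟨by simpa using hc, fun d hd => hcur d (by simpa using hd)⟩
        · exact hacc v hv
    · simp only [hsp, Bool.false_eq_true, if_false] at hw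
      refine ih (c :: cur) acc ?_ hacc w hw
      intro d hd
      rcases List.mem_cons.mp hd with hd | hd
      · rw [hd]; simpa using hsp
      · exact hcur d hd

theorem pvSplitOk (s : List Char) : ∀ w ∈ PySem.Chars.split₀ s, pvWordOk w := by
  intro w hw
  exact pvGoOk s [] [] (by simp) (by simp) w (by simpa [PySem.Chars.split₀] using hw)

theorem pvToListSp : ∀ (ws : List String) (r : String),
    (pvSp r ws).toList = r.toList ++ ((ws.map String.toList).map (fun w => w ++ [' '])).flatten := by
  intro ws
  induction ws with
  | nil => intro r; simp [pvSp]
  | cons w ws ih =>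
    intro r
    simp only [pvSp, List.foldl_cons] at *
    rw [ih (r ++ w ++ " ")]
    simp

theorem pvLimpaSp (ws : List String) (h : ∀ w ∈ ws, pvWordOk w.toList) :
    limpa_texto (pvSp "" ws) = PySem.Str.join " " ws := by
  have hsplit : PySem.Str.split₀ (pvSp "" ws) = ws := by
    rw [PySem.Str.split₀]
    rw [pvToListSp ws ""]
    simp only [String.toList_empty, List.nil_append]
    rw [pvSplitFlat (ws.map String.toList) (by
      intro w hw
      rcases List.mem_map.mp hw with ⟨v, hv, rfl⟩
      exact h v hv)]
    rw [List.map_map]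
    exact List.map_id'' (fun w => by simp) ws
  rw [limpa_texto, hsplit]

-- ===== VERDICT (by name: the statement is the Claim_ definition above) =====
theorem corta_texto_spec : Claim_equal_corta_texto := by
  intro string int _
  unfold Spec_corta_texto corta_texto corta_texto_alt
  simp only []
  have hfold := pvFoldFalse int (PySem.Str.split₀ string) 0 "" ""
  have hok : ∀ w ∈ PySem.Str.split₀ string, pvWordOk w.toList := by
    intro w hw
    rw [PySem.Str.split₀] at hw
    rcases List.mem_map.mp hw with ⟨v, hv, rfl⟩
    have := pvSplitOk string.toList v hv
    simpa using this
  rw [hfold.1, hfold.2]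
  rw [pvLimpaSp _ (fun w hw => hok w (List.mem_of_mem_take hw)),
      pvLimpaSp _ (fun w hw => hok w (List.mem_of_mem_drop hw))]
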